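-- pv_equiv track=rewrite | github.com/Grimorum1/Stepik | 1 Первые шаги в ООП/1.7 Методы классы (classmethod) и статические методы (staticmathod)/Подвиг №8.py | check_card_number
-- ===== SOURCE A (Python) =====
-- def check_card_number(number):
--     counter = 1
--     if len(number) == 19:
--         for i in number:
--             if counter % 5 == 0 and i != "-":
--                 return False
--             if counter % 5 != 0 and not i.isdigit():
--                 return False
--             counter += 1
--         return True
--     else:
--         return False
-- ===== SOURCE B (Python) =====
-- def check_card_number(number):
--     if len(number) != 19:
--         return False
--     if not (number[4] == number[9] == number[14] == "-"):
--         return False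
--     groups = (number[0:4], number[5:9], number[10:14], number[15:19])
--     return all(g.isdigit() for g in groups)
-- ===== Notes on version B (the rewrite author's own statement) =====
-- stated objective: simpler
-- what changed: Replaces the stateful counter-modulo-5 scan with early returns by direct field parsing: a length guard, a check that positions 4/9/14 are dashes, and an isdigit test on the four sliced 4-character groups.
import Mathlib
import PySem

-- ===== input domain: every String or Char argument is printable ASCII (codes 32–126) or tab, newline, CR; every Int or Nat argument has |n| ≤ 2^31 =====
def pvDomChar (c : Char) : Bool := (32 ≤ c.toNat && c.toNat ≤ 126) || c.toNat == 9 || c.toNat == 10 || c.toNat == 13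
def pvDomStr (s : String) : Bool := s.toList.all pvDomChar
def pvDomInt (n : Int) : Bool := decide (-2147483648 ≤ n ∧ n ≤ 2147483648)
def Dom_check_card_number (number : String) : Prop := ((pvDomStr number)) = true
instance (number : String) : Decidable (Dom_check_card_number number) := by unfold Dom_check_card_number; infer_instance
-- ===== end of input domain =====

-- B replaces A's positional counter-mod-5 scan by field parsing (length guard, fixed dash
-- positions, isdigit on the four sliced groups); objective: simpler. Return values agree on all strings.

-- ===== PORT A =====
-- positional scan: counter 1..19, every 5th char must be '-', others digits
def checkCardLoop : List Char → Int → Bool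
  | [], _ => true
  | c :: rest, counter =>
    if PySem.Int.mod counter 5 == 0 && c != '-' then false
    else if PySem.Int.mod counter 5 != 0 && !(PySem.Chars.isdigit c) then false
    else checkCardLoop rest (counter + 1)

def check_card_number (number : String) : Bool :=
  if PySem.Str.len number == 19 then checkCardLoop number.toList 1 else false

-- ===== PORT B =====
def check_card_number_alt (number : String) : Bool :=
  if PySem.Str.len number != 19 then false
  else if !(PySem.Str.pyGet? number 4 == PySem.Str.pyGet? number 9
            && PySem.Str.pyGet? number 9 == PySem.Str.pyGet? number 14
            && PySem.Str.pyGet? number 14 == some '-') then false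
  else
    [PySem.Str.slice number (some 0) (some 4),
     PySem.Str.slice number (some 5) (some 9),
     PySem.Str.slice number (some 10) (some 14),
     PySem.Str.slice number (some 15) (some 19)].all PySem.Str.strIsdigit

-- ===== PRECONDITION & SPEC =====
def Spec_check_card_number (number : String) (out : Bool) : Prop := out = check_card_number_alt number
instance (number : String) (out : Bool) : Decidable (Spec_check_card_number number out) := by unfold Spec_check_card_number; infer_instance

-- ===== CLAIM (what is proved, stated in full; the proofs are below) =====
def Claim_equal_check_card_number : Prop := ∀ (number : String), Dom_check_card_number number → Spec_check_card_number number (check_card_number number)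

-- ===== LEMMAS AND PROOFS =====

lemma list19 (l : List Char) (h : l.length = 19) :
    ∃ a0 a1 a2 a3 a4 a5 a6 a7 a8 a9 a10 a11 a12 a13 a14 a15 a16 a17 a18,
      l = [a0,a1,a2,a3,a4,a5,a6,a7,a8,a9,a10,a11,a12,a13,a14,a15,a16,a17,a18] := by
  match l, h with
  | [a0,a1,a2,a3,a4,a5,a6,a7,a8,a9,a10,a11,a12,a13,a14,a15,a16,a17,a18], _ =>
    exact ⟨a0,a1,a2,a3,a4,a5,a6,a7,a8,a9,a10,a11,a12,a13,a14,a15,a16,a17,a18, rfl⟩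

-- ===== VERDICT (by name: the statement is the Claim_ definition above) =====
theorem check_card_number_spec : Claim_equal_check_card_number := by
  intro number _
  unfold Spec_check_card_number check_card_number check_card_number_alt
  rcases h19 : decide (number.toList.length = 19) with _ | _
  · simp at h19
    have h : ¬((number.length : Int) = 19) := by exact_mod_cast h19
    simp [PySem.Str.len_eq, h]
  · simp at h19
    obtain ⟨c0,c1,c2,c3,c4,c5,c6,c7,c8,c9,c10,c11,c12,c13,c14,c15,c16,c17,c18,hl⟩ :=
      list19 number.toList h19
    simp [PySem.Str.len_eq, hl, checkCardLoop, PySem.Int.mod, PySem.Chars.strIsdigit,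
      PySem.List.slice, PySem.List.clampIdx]
    rw [Bool.eq_iff_iff]
    constructor <;> intro h <;> simp_all
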